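-- pv_equiv track=rewrite | github.com/king-phyte/aoc2020 | Day 24/part_1.py | tiles_with_black_side_up
-- ===== SOURCE A (Python) =====
-- from typing import Sequence, Tuple, Set
--
-- def move(direction: str, magnitude: int) -> Tuple[int, int]:
--     if direction == 'e':
--         return 1, 0
--
--     if direction == 'se':
--         if magnitude % 2:
--             return 0, -1
--         return 1, -1
--
--     if direction == 'sw':
--         if magnitude % 2:
--             return -1, -1
--         return 0, -1
--
--     if direction == 'w':
--         return -1, 0
--
--     if direction == 'nw':
--         if magnitude % 2:
--             return -1, 1
--         return 0, 1
--     elif magnitude % 2: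
--         return 0, 1
--
--     return 1, 1
--
-- def tiles_with_black_side_up(instructions: Sequence[str]) -> Set[Tuple[int, int]]:
--     flipped = set()
--     moves = ('e', 'se', 'sw', 'w', 'nw', 'ne')
--
--     for instruction in instructions:
--         direction = ''
--         x, y = (0, 0)
--
--         for char in instruction:
--             direction += char
--
--             if direction in moves:
--                 change_in_x, change_in_y = move(direction, y)
--                 x += change_in_x
--                 y += change_in_y
--                 direction = ''
--
--         if (x, y) in flipped:
--             flipped.remove((x, y))
--         else:
--             flipped.add((x, y))
--
--     return flipped
-- ===== SOURCE B (Python) =====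
-- def tiles_with_black_side_up(instructions):
--     # Walk each instruction in parity-free axial hex coordinates (constant step
--     # vectors, greedy 1/2-char tokenizer), convert to offset coords at the end.
--     AX = {'e': (1, 0), 'w': (-1, 0), 'se': (0, -1),
--           'sw': (-1, -1), 'nw': (0, 1), 'ne': (1, 1)}
--     flipped = set()
--     for instruction in instructions:
--         q = r = 0
--         i, n = 0, len(instruction)
--         while i < n:
--             c = instruction[i]
--             if c in ('e', 'w'):
--                 token, i = c, i + 1
--             elif c in ('n', 's') and i + 1 < n and instruction[i + 1] in ('e', 'w'):
--                 token, i = c + instruction[i + 1], i + 2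
--             else:
--                 break
--             dq, dr = AX[token]
--             q += dq
--             r += dr
--         tile = (q - r // 2, r)
--         if tile in flipped:
--             flipped.remove(tile)
--         else:
--             flipped.add(tile)
--     return flipped
-- ===== Notes on version B (the rewrite author's own statement) =====
-- stated objective: alternative
-- what changed: B walks each instruction in parity-independent axial hex coordinates where every direction is a constant step vector (greedy one/two-char tokenizer with lookahead, no per-step row-parity branching) and converts the final axial coordinate back to A's odd-row offset tuple (q - r//2, r) once before toggling it in the set.
import Mathlib
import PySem

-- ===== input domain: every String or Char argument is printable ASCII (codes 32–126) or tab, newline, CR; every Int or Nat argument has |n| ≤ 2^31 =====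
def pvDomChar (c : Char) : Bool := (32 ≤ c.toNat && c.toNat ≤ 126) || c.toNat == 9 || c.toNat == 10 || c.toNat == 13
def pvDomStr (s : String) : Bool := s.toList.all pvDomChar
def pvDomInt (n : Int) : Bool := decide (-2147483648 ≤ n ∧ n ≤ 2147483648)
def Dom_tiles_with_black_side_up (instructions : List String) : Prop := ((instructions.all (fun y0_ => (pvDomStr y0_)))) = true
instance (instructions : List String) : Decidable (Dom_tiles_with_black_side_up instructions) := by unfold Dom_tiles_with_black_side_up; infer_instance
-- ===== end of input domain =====

-- B walks each instruction in parity-free axial hex coordinates with constant step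
-- vectors and a greedy 1/2-char tokenizer, converting to offset coordinates once at
-- the end, instead of A's per-step row-parity branching (objective: alternative).

-- ===== PORT A =====
-- Python strings are ported as List Char (PySem convention: string ops are exact on List Char).
def moveA (direction : List Char) (magnitude : Int) : Int × Int :=
  if direction = ['e'] then (1, 0)
  else if direction = ['s', 'e'] then
    (if PySem.Int.mod magnitude 2 ≠ 0 then (0, -1) else (1, -1))
  else if direction = ['s', 'w'] then
    (if PySem.Int.mod magnitude 2 ≠ 0 then (-1, -1) else (0, -1))
  else if direction = ['w'] then (-1, 0)
  else if direction = ['n', 'w'] then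
    (if PySem.Int.mod magnitude 2 ≠ 0 then (-1, 1) else (0, 1))
  else if PySem.Int.mod magnitude 2 ≠ 0 then (0, 1)
  else (1, 1)

-- one iteration of A's inner 'for char in instruction' loop; state = (direction, x, y)
def stepA (st : List Char × Int × Int) (ch : Char) : List Char × Int × Int :=
  let d := st.1 ++ [ch]          -- direction += char
  if d = ['e'] ∨ d = ['s', 'e'] ∨ d = ['s', 'w'] ∨ d = ['w'] ∨ d = ['n', 'w'] ∨ d = ['n', 'e'] then
    let m := moveA d st.2.2
    ([], st.2.1 + m.1, st.2.2 + m.2)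
  else (d, st.2.1, st.2.2)

def tiles_with_black_side_up (instructions : List String) : List (Int × Int) :=
  instructions.foldl
    (fun flipped instruction =>
      let st := instruction.toList.foldl stepA ([], 0, 0)
      let t := (st.2.1, st.2.2)
      if PySem.Set.contains flipped t then PySem.Set.discard flipped t   -- remove of a member
      else PySem.Set.add flipped t)
    PySem.Set.empty

-- ===== PORT B =====
-- AX[token] of Source B (tokens handed in are always the six keys)
def axStep (t : List Char) : Int × Int :=
  if t = ['e'] then (1, 0) else if t = ['w'] then (-1, 0)
  else if t = ['s', 'e'] then (0, -1) else if t = ['s', 'w'] then (-1, -1)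
  else if t = ['n', 'w'] then (0, 1) else if t = ['n', 'e'] then (1, 1) else (0, 0)

-- Source B's while loop: greedy tokenizer over the characters, accumulating axial (q, r)
def walkB : List Char → Int → Int → Int × Int
  | [], q, r => (q, r)
  | c :: rest, q, r =>
    if c = 'e' ∨ c = 'w' then
      let m := axStep [c]
      walkB rest (q + m.1) (r + m.2)
    else if c = 'n' ∨ c = 's' then
      match rest with
      | c2 :: rest2 =>
        if c2 = 'e' ∨ c2 = 'w' then
          let m := axStep [c, c2]
          walkB rest2 (q + m.1) (r + m.2)
        else (q, r)                    -- break
      | [] => (q, r)                   -- i + 1 < n fails: break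
    else (q, r)                        -- break

def tiles_with_black_side_up_alt (instructions : List String) : List (Int × Int) :=
  instructions.foldl
    (fun flipped instruction =>
      let p := walkB instruction.toList 0 0
      let t := (p.1 - PySem.Int.floordiv p.2 2, p.2)   -- tile = (q - r // 2, r)
      if PySem.Set.contains flipped t then PySem.Set.discard flipped t
      else PySem.Set.add flipped t)
    PySem.Set.empty

-- ===== PRECONDITION & SPEC =====
def Spec_tiles_with_black_side_up (instructions : List String) (out : List (Int × Int)) : Prop := out = tiles_with_black_side_up_alt instructions
instance (instructions : List String) (out : List (Int × Int)) : Decidable (Spec_tiles_with_black_side_up instructions out) := by unfold Spec_tiles_with_black_side_up; infer_instance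

-- ===== CLAIM (what is proved, stated in full; the proofs are below) =====
def Claim_equal_tiles_with_black_side_up : Prop := ∀ (instructions : List String), Dom_tiles_with_black_side_up instructions → Spec_tiles_with_black_side_up instructions (tiles_with_black_side_up instructions)

-- ===== LEMMAS AND PROOFS =====

-- once A's pending direction has length ≥ 2 it can never match a move again
theorem dead_ge2 : ∀ (cs buf : List Char) (x y : Int), 2 ≤ buf.length →
    (cs.foldl stepA (buf, x, y)).2 = (x, y) := by
  intro cs
  induction cs with
  | nil => intro buf x y _; rfl
  | cons c rest ih =>
    intro buf x y h
    have hlen : (buf ++ [c]).length = buf.length + 1 := by simp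
    have hno : ¬((buf ++ [c]) = ['e'] ∨ (buf ++ [c]) = ['s', 'e'] ∨ (buf ++ [c]) = ['s', 'w'] ∨
        (buf ++ [c]) = ['w'] ∨ (buf ++ [c]) = ['n', 'w'] ∨ (buf ++ [c]) = ['n', 'e']) := by
      intro hc
      rcases hc with h1 | h1 | h1 | h1 | h1 | h1 <;>
        (have h2 := congrArg List.length h1; rw [hlen] at h2; simp only [List.length_cons, List.length_nil] at h2; omega)
    have hstep : stepA (buf, x, y) c = (buf ++ [c], x, y) := by
      simp [stepA, hno]
    rw [List.foldl_cons, hstep]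
    exact ih (buf ++ [c]) x y (by simp; omega)

-- a single character that starts no move leaves A's walk stuck for good
theorem dead1 : ∀ (cs : List Char) (c : Char) (x y : Int), c ≠ 'e' → c ≠ 'w' → c ≠ 'n' → c ≠ 's' →
    (cs.foldl stepA ([c], x, y)).2 = (x, y) := by
  intro cs c x y he hw hn hs
  cases cs with
  | nil => rfl
  | cons c2 rest =>
    have hstep : stepA ([c], x, y) c2 = ([c, c2], x, y) := by
      simp [stepA, he, hw, hn, hs]
    rw [List.foldl_cons, hstep]
    exact dead_ge2 rest [c, c2] x y (by simp)

-- the heart: A's offset walk equals B's axial walk read back through (q - r//2, r)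
theorem mainLemma : ∀ (cs : List Char) (x y q r : Int),
    q = x + PySem.Int.floordiv y 2 → r = y →
    (cs.foldl stepA ([], x, y)).2 =
      ((walkB cs q r).1 - PySem.Int.floordiv (walkB cs q r).2 2, (walkB cs q r).2) := by
  have e1 : ∀ a : Int, PySem.Int.floordiv a 2 = a / 2 :=
    fun a => PySem.Int.floordiv_eq_ediv_of_pos (by norm_num)
  have e2 : ∀ a : Int, PySem.Int.mod a 2 = a % 2 :=
    fun a => PySem.Int.mod_eq_emod_of_pos (by norm_num)
  suffices H : ∀ (n : Nat) (cs : List Char), cs.length ≤ n → ∀ (x y q r : Int),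
      q = x + PySem.Int.floordiv y 2 → r = y →
      (cs.foldl stepA ([], x, y)).2 =
        ((walkB cs q r).1 - PySem.Int.floordiv (walkB cs q r).2 2, (walkB cs q r).2) by
    exact fun cs => H cs.length cs le_rfl
  intro n
  induction n with
  | zero =>
    intro cs hlen
    cases cs with
    | nil =>
      intro x y q r hq hr
      rw [List.foldl_nil, show walkB [] q r = (q, r) from by rw [walkB.eq_def]]
      show (x, y) = (q - PySem.Int.floordiv r 2, r)
      simp only [e1] at hq ⊢
      simp only [Prod.mk.injEq]
      omega
    | cons c rest =>
      exact (False.elim (by simp only [List.length_cons] at hlen; omega))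
  | succ n ihn =>
    intro cs hlen
    cases cs with
    | nil =>
      intro x y q r hq hr
      rw [List.foldl_nil, show walkB [] q r = (q, r) from by rw [walkB.eq_def]]
      show (x, y) = (q - PySem.Int.floordiv r 2, r)
      simp only [e1] at hq ⊢
      simp only [Prod.mk.injEq]
      omega
    | cons c rest =>
      intro x y q r hq hr
      have hrest : rest.length ≤ n := by simp only [List.length_cons] at hlen; omega
      by_cases hce : c = 'e'
      · subst hce
        rw [List.foldl_cons, show stepA ([], x, y) 'e' = ([], x + 1, y + 0) from rfl,
          show walkB ('e' :: rest) q r = walkB rest (q + 1) (r + 0) from by rw [walkB.eq_def]; simp [axStep]]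
        exact ihn rest hrest (x + 1) (y + 0) (q + 1) (r + 0) (by simp only [e1] at hq ⊢; omega) (by omega)
      · by_cases hcw : c = 'w'
        · subst hcw
          rw [List.foldl_cons, show stepA ([], x, y) 'w' = ([], x + -1, y + 0) from rfl,
            show walkB ('w' :: rest) q r = walkB rest (q + -1) (r + 0) from by rw [walkB.eq_def]; simp [axStep]]
          exact ihn rest hrest (x + -1) (y + 0) (q + -1) (r + 0) (by simp only [e1] at hq ⊢; omega) (by omega)
        · by_cases hcn : c = 'n'
          · subst hcn
            cases rest with
            | nil =>
              rw [show walkB ['n'] q r = (q, r) from by rw [walkB.eq_def]; simp,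
                List.foldl_cons, show stepA ([], x, y) 'n' = (['n'], x, y) from rfl, List.foldl_nil]
              show (x, y) = (q - PySem.Int.floordiv r 2, r)
              simp only [e1] at hq ⊢
              simp only [Prod.mk.injEq]
              omega
            | cons c2 rest2 =>
              by_cases h2e : c2 = 'e'
              · subst h2e
                have hwb : walkB ('n' :: 'e' :: rest2) q r = walkB rest2 (q + 1) (r + 1) := by
                  rw [walkB.eq_def]; simp [axStep]
                by_cases hm : PySem.Int.mod y 2 ≠ 0
                · have hstep : stepA (['n'], x, y) 'e' = ([], x + 0, y + 1) := by
                    rw [show stepA (['n'], x, y) 'e' = ([], x + (moveA ['n', 'e'] y).1, y + (moveA ['n', 'e'] y).2) from rfl,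
                      show moveA ['n', 'e'] y = (if PySem.Int.mod y 2 ≠ 0 then ((0 : Int), (1 : Int)) else (1, 1)) from rfl, if_pos hm]
                  have hy : y % 2 ≠ 0 := by rw [← e2 y]; exact hm
                  rw [List.foldl_cons, show stepA ([], x, y) 'n' = (['n'], x, y) from rfl, List.foldl_cons, hstep, hwb]
                  exact ihn rest2 (by simp only [List.length_cons] at hrest; omega) (x + 0) (y + 1) (q + 1) (r + 1) (by simp only [e1] at hq ⊢; omega) (by omega)
                · have hstep : stepA (['n'], x, y) 'e' = ([], x + 1, y + 1) := by
                    rw [show stepA (['n'], x, y) 'e' = ([], x + (moveA ['n', 'e'] y).1, y + (moveA ['n', 'e'] y).2) from rfl,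
                      show moveA ['n', 'e'] y = (if PySem.Int.mod y 2 ≠ 0 then ((0 : Int), (1 : Int)) else (1, 1)) from rfl, if_neg hm]
                  have hy : y % 2 = 0 := by rw [← e2 y]; exact not_not.mp hm
                  rw [List.foldl_cons, show stepA ([], x, y) 'n' = (['n'], x, y) from rfl, List.foldl_cons, hstep, hwb]
                  exact ihn rest2 (by simp only [List.length_cons] at hrest; omega) (x + 1) (y + 1) (q + 1) (r + 1) (by simp only [e1] at hq ⊢; omega) (by omega)
              · by_cases h2w : c2 = 'w'
                · subst h2w
                  have hwb : walkB ('n' :: 'w' :: rest2) q r = walkB rest2 (q + 0) (r + 1) := by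
                    rw [walkB.eq_def]; simp [axStep]
                  by_cases hm : PySem.Int.mod y 2 ≠ 0
                  · have hstep : stepA (['n'], x, y) 'w' = ([], x + -1, y + 1) := by
                      rw [show stepA (['n'], x, y) 'w' = ([], x + (moveA ['n', 'w'] y).1, y + (moveA ['n', 'w'] y).2) from rfl,
                        show moveA ['n', 'w'] y = (if PySem.Int.mod y 2 ≠ 0 then ((-1 : Int), (1 : Int)) else (0, 1)) from rfl, if_pos hm]
                    have hy : y % 2 ≠ 0 := by rw [← e2 y]; exact hm
                    rw [List.foldl_cons, show stepA ([], x, y) 'n' = (['n'], x, y) from rfl, List.foldl_cons, hstep, hwb]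
                    exact ihn rest2 (by simp only [List.length_cons] at hrest; omega) (x + -1) (y + 1) (q + 0) (r + 1) (by simp only [e1] at hq ⊢; omega) (by omega)
                  · have hstep : stepA (['n'], x, y) 'w' = ([], x + 0, y + 1) := by
                      rw [show stepA (['n'], x, y) 'w' = ([], x + (moveA ['n', 'w'] y).1, y + (moveA ['n', 'w'] y).2) from rfl,
                        show moveA ['n', 'w'] y = (if PySem.Int.mod y 2 ≠ 0 then ((-1 : Int), (1 : Int)) else (0, 1)) from rfl, if_neg hm]
                    have hy : y % 2 = 0 := by rw [← e2 y]; exact not_not.mp hm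
                    rw [List.foldl_cons, show stepA ([], x, y) 'n' = (['n'], x, y) from rfl, List.foldl_cons, hstep, hwb]
                    exact ihn rest2 (by simp only [List.length_cons] at hrest; omega) (x + 0) (y + 1) (q + 0) (r + 1) (by simp only [e1] at hq ⊢; omega) (by omega)
                · -- dead: 'n' followed by a char that completes no move
                  rw [List.foldl_cons, show stepA ([], x, y) 'n' = (['n'], x, y) from rfl,
                    List.foldl_cons, show stepA (['n'], x, y) c2 = (['n', c2], x, y) from by simp [stepA, h2e, h2w],
                    show walkB ('n' :: c2 :: rest2) q r = (q, r) from by rw [walkB.eq_def]; simp [h2e, h2w],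
                    dead_ge2 rest2 ['n', c2] x y (by simp)]
                  show (x, y) = (q - PySem.Int.floordiv r 2, r)
                  simp only [e1] at hq ⊢
                  simp only [Prod.mk.injEq]
                  omega
          · by_cases hcs : c = 's'
            · subst hcs
              cases rest with
              | nil =>
                rw [show walkB ['s'] q r = (q, r) from by rw [walkB.eq_def]; simp,
                  List.foldl_cons, show stepA ([], x, y) 's' = (['s'], x, y) from rfl, List.foldl_nil]
                show (x, y) = (q - PySem.Int.floordiv r 2, r)
                simp only [e1] at hq ⊢
                simp only [Prod.mk.injEq]
                omega
              | cons c2 rest2 =>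
                by_cases h2e : c2 = 'e'
                · subst h2e
                  have hwb : walkB ('s' :: 'e' :: rest2) q r = walkB rest2 (q + 0) (r + -1) := by
                    rw [walkB.eq_def]; simp [axStep]
                  by_cases hm : PySem.Int.mod y 2 ≠ 0
                  · have hstep : stepA (['s'], x, y) 'e' = ([], x + 0, y + -1) := by
                      rw [show stepA (['s'], x, y) 'e' = ([], x + (moveA ['s', 'e'] y).1, y + (moveA ['s', 'e'] y).2) from rfl,
                        show moveA ['s', 'e'] y = (if PySem.Int.mod y 2 ≠ 0 then ((0 : Int), (-1 : Int)) else (1, -1)) from rfl, if_pos hm]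
                    have hy : y % 2 ≠ 0 := by rw [← e2 y]; exact hm
                    rw [List.foldl_cons, show stepA ([], x, y) 's' = (['s'], x, y) from rfl, List.foldl_cons, hstep, hwb]
                    exact ihn rest2 (by simp only [List.length_cons] at hrest; omega) (x + 0) (y + -1) (q + 0) (r + -1) (by simp only [e1] at hq ⊢; omega) (by omega)
                  · have hstep : stepA (['s'], x, y) 'e' = ([], x + 1, y + -1) := by
                      rw [show stepA (['s'], x, y) 'e' = ([], x + (moveA ['s', 'e'] y).1, y + (moveA ['s', 'e'] y).2) from rfl,
                        show moveA ['s', 'e'] y = (if PySem.Int.mod y 2 ≠ 0 then ((0 : Int), (-1 : Int)) else (1, -1)) from rfl, if_neg hm]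
                    have hy : y % 2 = 0 := by rw [← e2 y]; exact not_not.mp hm
                    rw [List.foldl_cons, show stepA ([], x, y) 's' = (['s'], x, y) from rfl, List.foldl_cons, hstep, hwb]
                    exact ihn rest2 (by simp only [List.length_cons] at hrest; omega) (x + 1) (y + -1) (q + 0) (r + -1) (by simp only [e1] at hq ⊢; omega) (by omega)
                · by_cases h2w : c2 = 'w'
                  · subst h2w
                    have hwb : walkB ('s' :: 'w' :: rest2) q r = walkB rest2 (q + -1) (r + -1) := by
                      rw [walkB.eq_def]; simp [axStep]
                    by_cases hm : PySem.Int.mod y 2 ≠ 0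
                    · have hstep : stepA (['s'], x, y) 'w' = ([], x + -1, y + -1) := by
                        rw [show stepA (['s'], x, y) 'w' = ([], x + (moveA ['s', 'w'] y).1, y + (moveA ['s', 'w'] y).2) from rfl,
                          show moveA ['s', 'w'] y = (if PySem.Int.mod y 2 ≠ 0 then ((-1 : Int), (-1 : Int)) else (0, -1)) from rfl, if_pos hm]
                      have hy : y % 2 ≠ 0 := by rw [← e2 y]; exact hm
                      rw [List.foldl_cons, show stepA ([], x, y) 's' = (['s'], x, y) from rfl, List.foldl_cons, hstep, hwb]
                      exact ihn rest2 (by simp only [List.length_cons] at hrest; omega) (x + -1) (y + -1) (q + -1) (r + -1) (by simp only [e1] at hq ⊢; omega) (by omega)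
                    · have hstep : stepA (['s'], x, y) 'w' = ([], x + 0, y + -1) := by
                        rw [show stepA (['s'], x, y) 'w' = ([], x + (moveA ['s', 'w'] y).1, y + (moveA ['s', 'w'] y).2) from rfl,
                          show moveA ['s', 'w'] y = (if PySem.Int.mod y 2 ≠ 0 then ((-1 : Int), (-1 : Int)) else (0, -1)) from rfl, if_neg hm]
                      have hy : y % 2 = 0 := by rw [← e2 y]; exact not_not.mp hm
                      rw [List.foldl_cons, show stepA ([], x, y) 's' = (['s'], x, y) from rfl, List.foldl_cons, hstep, hwb]
                      exact ihn rest2 (by simp only [List.length_cons] at hrest; omega) (x + 0) (y + -1) (q + -1) (r + -1) (by simp only [e1] at hq ⊢; omega) (by omega)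
                  · -- dead: 's' followed by a char that completes no move
                    rw [List.foldl_cons, show stepA ([], x, y) 's' = (['s'], x, y) from rfl,
                      List.foldl_cons, show stepA (['s'], x, y) c2 = (['s', c2], x, y) from by simp [stepA, h2e, h2w],
                      show walkB ('s' :: c2 :: rest2) q r = (q, r) from by rw [walkB.eq_def]; simp [h2e, h2w],
                      dead_ge2 rest2 ['s', c2] x y (by simp)]
                    show (x, y) = (q - PySem.Int.floordiv r 2, r)
                    simp only [e1] at hq ⊢
                    simp only [Prod.mk.injEq]
                    omega
            · -- c starts no move: A goes dead, B breaks
              rw [List.foldl_cons, show stepA ([], x, y) c = ([c], x, y) from by simp [stepA, hce, hcw, hcn, hcs],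
                dead1 rest c x y hce hcw hcn hcs,
                show walkB (c :: rest) q r = (q, r) from by rw [walkB.eq_def]; simp [hce, hcw, hcn, hcs]]
              show (x, y) = (q - PySem.Int.floordiv r 2, r)
              simp only [e1] at hq ⊢
              simp only [Prod.mk.injEq]
              omega

theorem tiles_with_black_side_up_spec : Claim_equal_tiles_with_black_side_up := by
  intro instructions _
  unfold Spec_tiles_with_black_side_up tiles_with_black_side_up tiles_with_black_side_up_alt
  have key : ∀ (s : String),
      ((s.toList.foldl stepA ([], 0, 0)).2.1, (s.toList.foldl stepA ([], 0, 0)).2.2) =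
        ((walkB s.toList 0 0).1 - PySem.Int.floordiv (walkB s.toList 0 0).2 2,
         (walkB s.toList 0 0).2) := by
    intro s
    rw [Prod.mk.eta]
    exact mainLemma s.toList 0 0 0 0 (by decide) rfl
  congr 1
  funext flipped s
  dsimp only
  rw [key s]
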